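-- pv_equiv track=rewrite | github.com/kkr010128/codebert | problem152/problem152_96.py | count_reverse
-- ===== SOURCE A (Python) =====
-- def count_reverse(s):
--     m=0
--     e=0
--     for t in s[::-1]:
--         if t==')':
--             e+=1
--         else:
--             e-=1
--             m=min(m,e)
--     return (e,m)
-- ===== SOURCE B (Python) =====
-- def count_reverse(s):
--     ps = [0]
--     for t in s:
--         ps.append(ps[-1] + (1 if t == ')' else -1))
--     total = ps[-1]
--     return (total, total - max(ps))
-- ===== Notes on version B (the rewrite author's own statement) =====
-- stated objective: alternative
-- what changed: B builds the explicit forward prefix-sum array (seeded with 0) in one forward pass and returns (last, last - max(array)), using the duality min-suffix-sum = total - max-prefix-sum, instead of A's reversed-string scan keeping a running minimum.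
import Mathlib
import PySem

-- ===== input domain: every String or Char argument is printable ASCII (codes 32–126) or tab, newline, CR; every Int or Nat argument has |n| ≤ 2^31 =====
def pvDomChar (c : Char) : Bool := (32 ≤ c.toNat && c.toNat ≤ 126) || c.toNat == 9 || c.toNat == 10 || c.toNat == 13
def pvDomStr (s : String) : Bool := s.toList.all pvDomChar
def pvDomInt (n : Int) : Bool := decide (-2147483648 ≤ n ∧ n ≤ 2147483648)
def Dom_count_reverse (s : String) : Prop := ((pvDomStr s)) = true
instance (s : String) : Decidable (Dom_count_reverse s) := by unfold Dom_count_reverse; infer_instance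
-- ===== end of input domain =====

-- B builds the explicit forward prefix-sum array and returns (last, last - max(array))
-- instead of A's reversed-string scan with a running minimum; alternative algorithm, same O(n) time.

-- ===== PORT A =====
-- state (m, e); s[::-1] iterates the reversed string
def count_reverse (s : String) : Int × Int :=
  let st := s.toList.reverse.foldl
    (fun (p : Int × Int) t =>
      if t = ')' then (p.1, p.2 + 1) else (min p.1 (p.2 - 1), p.2 - 1))
    (0, 0)
  (st.2, st.1)

-- ===== PORT B =====
-- ps = [0]; for t in s: ps.append(ps[-1] ± 1); return (ps[-1], ps[-1] - max(ps))
-- ps is never empty, so ps[-1] and max(ps) always return: pyGetD/getD defaults are unreachable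
def count_reverse_alt (s : String) : Int × Int :=
  let ps := s.toList.foldl
    (fun (ps : List Int) t =>
      ps ++ [PySem.List.pyGetD ps (-1) 0 + (if t = ')' then 1 else -1)])
    [0]
  let total := PySem.List.pyGetD ps (-1) 0
  (total, total - (PySem.List.max? ps (fun x => x)).getD 0)

-- ===== PRECONDITION & SPEC =====
def Spec_count_reverse (s : String) (out : Int × Int) : Prop := out = count_reverse_alt s
instance (s : String) (out : Int × Int) : Decidable (Spec_count_reverse s out) := by unfold Spec_count_reverse; infer_instance

-- ===== CLAIM (what is proved, stated in full; the proofs are below) =====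
def Claim_equal_count_reverse : Prop := ∀ (s : String), Dom_count_reverse s → Spec_count_reverse s (count_reverse s)

-- ===== LEMMAS AND PROOFS =====

-- value of one character
def pvVal (t : Char) : Int := if t = ')' then 1 else -1

-- sum of values of a list
def pvS : List Char → Int
  | [] => 0
  | c :: l => pvVal c + pvS l

-- maximum forward prefix sum (including the empty prefix)
def pvM : List Char → Int
  | [] => 0
  | c :: l => max 0 (pvVal c + pvM l)

-- forward prefix sums starting from e (nonempty prefixes only)
def pvScan (e : Int) : List Char → List Int
  | [] => []
  | c :: l => (e + pvVal c) :: pvScan (e + pvVal c) l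

theorem pvM_nonneg (l : List Char) : 0 ≤ pvM l := by
  cases l with
  | nil => simp [pvM]
  | cons c l => simp [pvM]

-- A's loop, as a foldr over the (unreversed) character list
theorem count_reverse_foldr (s : String) :
    count_reverse s =
      ((s.toList.foldr (fun t (p : Int × Int) =>
          if t = ')' then (p.1, p.2 + 1) else (min p.1 (p.2 - 1), p.2 - 1)) (0, 0)).2,
       (s.toList.foldr (fun t (p : Int × Int) =>
          if t = ')' then (p.1, p.2 + 1) else (min p.1 (p.2 - 1), p.2 - 1)) (0, 0)).1) := by
  simp [count_reverse, List.foldl_reverse]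

-- closed form of A's state
theorem foldrA_closed (l : List Char) :
    l.foldr (fun t (p : Int × Int) =>
        if t = ')' then (p.1, p.2 + 1) else (min p.1 (p.2 - 1), p.2 - 1)) (0, 0)
      = (pvS l - pvM l, pvS l) := by
  induction l with
  | nil => simp [pvS, pvM]
  | cons c l ih =>
    simp only [List.foldr_cons, ih, pvS, pvM, pvVal]
    by_cases h : c = ')'
    · have := pvM_nonneg l
      simp [h]
      omega
    · have := pvM_nonneg l
      simp [h]
      omega

-- B's list-building loop produces the prefix-sum list
theorem foldlB_scan (l : List Char) (acc : List Int) (e : Int) :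
    l.foldl (fun (ps : List Int) t =>
        ps ++ [PySem.List.pyGetD ps (-1) 0 + (if t = ')' then 1 else -1)]) (acc ++ [e])
      = (acc ++ [e]) ++ pvScan e l := by
  induction l generalizing acc e with
  | nil => simp [pvScan]
  | cons c l ih =>
    simp only [List.foldl_cons, PySem.List.pyGetD_neg_one_append_singleton]
    rw [List.append_assoc, ← List.append_assoc acc, ih (acc ++ [e]) (e + (if c = ')' then 1 else -1))]
    simp [pvScan, pvVal]

-- the last element of the built list is the total sum
theorem pyGetD_last_scan (l : List Char) (e : Int) (xs : List Int) :
    PySem.List.pyGetD ((xs ++ [e]) ++ pvScan e l) (-1) 0 = e + pvS l := by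
  induction l generalizing e xs with
  | nil => simp [pvScan, pvS, PySem.List.pyGetD_neg_one_append_singleton]
  | cons c l ih =>
    have : (xs ++ [e]) ++ pvScan e (c :: l)
        = ((xs ++ [e]) ++ [e + pvVal c]) ++ pvScan (e + pvVal c) l := by
      simp [pvScan]
    rw [this, ih (e + pvVal c) (xs ++ [e])]
    simp [pvS]; ring

-- running max over the prefix-sum list
theorem foldl_max_scan (l : List Char) (e a : Int) (h : e ≤ a) :
    (pvScan e l).foldl max a = max a (e + pvM l) := by
  induction l generalizing e a with
  | nil => simp [pvScan, pvM]; omega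
  | cons c l ih =>
    simp only [pvScan, List.foldl_cons]
    rw [ih (e + pvVal c) (max a (e + pvVal c)) (le_max_right _ _)]
    have := pvM_nonneg l
    simp only [pvM, pvVal]
    by_cases h' : c = ')' <;> simp [h'] <;> omega

-- ===== VERDICT (by name: the statement is the Claim_ definition above) =====
theorem count_reverse_spec : Claim_equal_count_reverse := by
  intro s _
  unfold Spec_count_reverse count_reverse_alt
  have hps : s.toList.foldl
      (fun (ps : List Int) t =>
        ps ++ [PySem.List.pyGetD ps (-1) 0 + (if t = ')' then 1 else -1)]) [0]
      = ([] ++ [(0 : Int)]) ++ pvScan 0 s.toList := by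
    exact foldlB_scan s.toList [] 0
  rw [count_reverse_foldr, foldrA_closed]
  simp only [hps]
  rw [pyGetD_last_scan s.toList 0 []]
  have hmax : PySem.List.max? ((([] : List Int) ++ [(0 : Int)]) ++ pvScan 0 s.toList) (fun x => x)
      = some ((pvScan 0 s.toList).foldl max 0) := by
    simp [PySem.List.max?_id_cons]
  rw [hmax, foldl_max_scan s.toList 0 0 le_rfl]
  have := pvM_nonneg s.toList
  simp
  omega
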